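-- pv_equiv track=rewrite | github.com/NoisNette/Codesignal-solutions | maxSumSegments.py | maxSumSegments
-- ===== SOURCE A (Python) =====
-- def maxSumSegments(inputArray):
--
--     result = []
--     for i in range(1, len(inputArray) + 1):
--         sum = 0
--         mxSum = 0
--         index = -1
--         for j in range(len(inputArray)):
--             sum += inputArray[j]
--             if j >= i:
--                 sum -= inputArray[j - i]
--             if j >= i - 1 and (index == -1 or sum > mxSum):
--                 mxSum = sum
--                 index = j - i + 1
--         result.append(index)
--     return result
-- ===== SOURCE B (Python) =====
-- def maxSumSegments(inputArray):
--     n = len(inputArray)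
--     P = [0]
--     for x in inputArray:
--         P.append(P[-1] + x)
--     result = []
--     for k in range(1, n + 1):
--         best_s = 0
--         best = P[k] - P[0]
--         for s in range(1, n - k + 1):
--             v = P[s + k] - P[s]
--             if v > best:
--                 best = v
--                 best_s = s
--         result.append(best_s)
--     return result
-- ===== Notes on version B (the rewrite author's own statement) =====
-- stated objective: faster
-- what changed: Replaced A's per-length incremental sliding-window running sum (add the entering element, conditionally subtract the leaving one, with a sentinel-index first-window test on every step) with one precomputed prefix-sum table and direct window sums P[s+k]-P[s], scanning only the valid start positions for each length.
import Mathlib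
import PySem

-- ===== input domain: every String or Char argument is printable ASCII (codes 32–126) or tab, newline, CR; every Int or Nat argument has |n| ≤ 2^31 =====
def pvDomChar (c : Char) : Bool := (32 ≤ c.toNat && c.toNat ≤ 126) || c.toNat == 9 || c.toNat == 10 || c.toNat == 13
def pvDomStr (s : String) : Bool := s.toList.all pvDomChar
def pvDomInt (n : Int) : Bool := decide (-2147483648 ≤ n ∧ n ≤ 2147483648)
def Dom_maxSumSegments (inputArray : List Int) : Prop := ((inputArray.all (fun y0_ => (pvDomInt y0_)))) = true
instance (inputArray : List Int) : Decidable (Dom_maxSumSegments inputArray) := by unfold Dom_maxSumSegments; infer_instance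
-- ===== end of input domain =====

-- B replaces A's per-length sliding running sum by one precomputed prefix-sum table
-- with direct window sums P[s+k]-P[s] (no per-step branch or sentinel test); measured constant-factor faster.

-- ===== PORT A =====
-- literal transliteration of A's nested sliding-window loops
def maxSumSegments (inputArray : List Int) : List Int :=
  (List.range inputArray.length).foldl (fun result i0 =>
    let i := i0 + 1
    let st := (List.range inputArray.length).foldl (fun (st : Int × Int × Int) j =>
      let s1 := st.1 + inputArray.getD j 0
      let s2 := if i ≤ j then s1 - inputArray.getD (j - i) 0 else s1
      if i ≤ j + 1 ∧ (st.2.2 = -1 ∨ st.2.1 < s2) then (s2, s2, (j : Int) - (i : Int) + 1)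
      else (s2, st.2.1, st.2.2)) ((0 : Int), (0 : Int), (-1 : Int))
    result ++ [st.2.2]) []

-- ===== PORT B =====
-- literal transliteration of B: prefix table built by appending, then direct window sums
def maxSumSegments_alt (inputArray : List Int) : List Int :=
  let n := inputArray.length
  let P := inputArray.foldl (fun ps x => ps ++ [ps.getLastD 0 + x]) ([0] : List Int)
  (List.range n).foldl (fun result k0 =>
    let k := k0 + 1
    let st := (List.range' 1 (n - k)).foldl (fun (st : Int × Int) s =>
      let v := P.getD (s + k) 0 - P.getD s 0
      if st.2 < v then ((s : Int), v) else st) ((0 : Int), P.getD k 0 - P.getD 0 0)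
    result ++ [st.1]) []

-- ===== PRECONDITION & SPEC =====
def Spec_maxSumSegments (inputArray : List Int) (out : List Int) : Prop := out = maxSumSegments_alt inputArray
instance (inputArray : List Int) (out : List Int) : Decidable (Spec_maxSumSegments inputArray out) := by unfold Spec_maxSumSegments; infer_instance

-- ===== CLAIM (what is proved, stated in full; the proofs are below) =====
def Claim_equal_maxSumSegments : Prop := ∀ (inputArray : List Int), Dom_maxSumSegments inputArray → Spec_maxSumSegments inputArray (maxSumSegments inputArray)

-- ===== LEMMAS AND PROOFS =====

-- sum of the first m elements
def Pf (xs : List Int) (m : Nat) : Int := (xs.take m).sum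

-- recursive form of the prefix-sum list
def pfx (a : Int) : List Int → List Int
  | [] => [a]
  | x :: xs => a :: pfx (a + x) xs

lemma fold_pfx (xs : List Int) : ∀ (pre : List Int) (a : Int),
    xs.foldl (fun ps x => ps ++ [ps.getLastD 0 + x]) (pre ++ [a]) = pre ++ pfx a xs := by
  induction xs with
  | nil => intro pre a; simp [pfx]
  | cons x xs ih =>
    intro pre a
    have h : (pre ++ [a]) ++ [(pre ++ [a]).getLastD 0 + x] = (pre ++ [a]) ++ [a + x] := by
      simp
    simp only [List.foldl_cons, h]
    rw [show (pre ++ [a]) ++ [a + x] = (pre ++ [a]) ++ [a + x] from rfl]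
    have := ih (pre ++ [a]) (a + x)
    simpa [pfx, List.append_assoc] using this

lemma pfx_getD (xs : List Int) : ∀ (m : Nat) (a : Int), m ≤ xs.length →
    (pfx a xs).getD m 0 = a + Pf xs m := by
  induction xs with
  | nil =>
    intro m a hm
    have : m = 0 := by simpa using hm
    subst this; simp [pfx, Pf]
  | cons x xs ih =>
    intro m a hm
    cases m with
    | zero => simp [pfx, Pf]
    | succ m =>
      simp only [pfx, List.getD_cons_succ]
      rw [ih m (a + x) (by simpa using hm)]
      simp [Pf, List.take_succ_cons]
      ring

lemma Pf_succ (xs : List Int) (j : Nat) (hj : j < xs.length) :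
    Pf xs (j + 1) = Pf xs j + xs.getD j 0 := by
  rw [Pf, Pf, List.sum_take_succ xs j hj]
  simp [hj]

-- A's inner step and B's inner step, named for the proofs
def stepA (xs : List Int) (i : Nat) (st : Int × Int × Int) (j : Nat) : Int × Int × Int :=
  let s1 := st.1 + xs.getD j 0
  let s2 := if i ≤ j then s1 - xs.getD (j - i) 0 else s1
  if i ≤ j + 1 ∧ (st.2.2 = -1 ∨ st.2.1 < s2) then (s2, s2, (j : Int) - (i : Int) + 1)
  else (s2, st.2.1, st.2.2)

def stepB (xs : List Int) (k : Nat) (st : Int × Int) (s : Nat) : Int × Int :=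
  let v := Pf xs (s + k) - Pf xs s
  if st.2 < v then ((s : Int), v) else st

-- Phase 1: j < k-1, only the running sum moves
lemma phase1 (xs : List Int) (k : Nat) (hk : k ≤ xs.length) :
    ∀ (m j0 : Nat), j0 + m + 1 ≤ k →
    (List.range' j0 m).foldl (stepA xs k) (Pf xs j0, 0, -1) = (Pf xs (j0 + m), 0, -1) := by
  intro m
  induction m with
  | zero => intro j0 _; simp
  | succ m ih =>
    intro j0 h
    rw [List.range'_succ, List.foldl_cons]
    have hj0 : ¬ k ≤ j0 := by omega
    have hj1 : ¬ k ≤ j0 + 1 := by omega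
    have : stepA xs k (Pf xs j0, 0, -1) j0 = (Pf xs (j0 + 1), 0, -1) := by
      simp [stepA, hj0, hj1, Pf_succ xs j0 (by omega)]
    rw [this, ih (j0 + 1) (by omega)]
    ring_nf

-- Phase 2: from the first full window on, A's selection mirrors B's
lemma phase2 (xs : List Int) (k : Nat) (hk : 1 ≤ k) :
    ∀ (m s0 : Nat) (mx idx : Int), 0 ≤ idx → s0 + k + m ≤ xs.length →
    (List.range' (s0 + k) m).foldl (stepA xs k) (Pf xs (s0 + k) - Pf xs s0, mx, idx) =
      (Pf xs (s0 + m + k) - Pf xs (s0 + m),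
       ((List.range' (s0 + 1) m).foldl (stepB xs k) (idx, mx)).2,
       ((List.range' (s0 + 1) m).foldl (stepB xs k) (idx, mx)).1) := by
  intro m
  induction m with
  | zero => intro s0 mx idx _ _; simp
  | succ m ih =>
    intro s0 mx idx hidx hlen
    rw [List.range'_succ, List.foldl_cons, List.range'_succ, List.foldl_cons]
    have hxj : xs.getD (s0 + k) 0 = Pf xs (s0 + k + 1) - Pf xs (s0 + k) := by
      rw [Pf_succ xs (s0 + k) (by omega)]; ring
    have hxs : xs.getD s0 0 = Pf xs (s0 + 1) - Pf xs s0 := by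
      rw [Pf_succ xs s0 (by omega)]; ring
    have hne : idx ≠ -1 := by omega
    have hsub : s0 + k - k = s0 := by omega
    have hA : stepA xs k (Pf xs (s0 + k) - Pf xs s0, mx, idx) (s0 + k) =
        (Pf xs (s0 + 1 + k) - Pf xs (s0 + 1),
         (stepB xs k (idx, mx) (s0 + 1)).2, (stepB xs k (idx, mx) (s0 + 1)).1) := by
      simp only [stepA, stepB, hsub]
      have hle : k ≤ s0 + k := by omega
      have hle1 : k ≤ s0 + k + 1 := by omega
      have hsum : Pf xs (s0 + k) - Pf xs s0 + xs.getD (s0 + k) 0 - xs.getD s0 0 =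
          Pf xs (s0 + 1 + k) - Pf xs (s0 + 1) := by
        rw [hxj, hxs]; ring_nf
      simp only [if_pos hle, hle1, true_and]
      by_cases hcmp : mx < Pf xs (s0 + k) - Pf xs s0 + xs.getD (s0 + k) 0 - xs.getD s0 0
      · rw [hsum] at hcmp ⊢
        have hv : Pf xs (s0 + 1 + k) - Pf xs (s0 + 1) = Pf xs (s0 + 1 + k) - Pf xs (s0 + 1) := rfl
        simp [hne, hcmp]
      · rw [hsum] at hcmp ⊢
        simp [hne, hcmp]
    rw [hA]
    have hidx' : 0 ≤ (stepB xs k (idx, mx) (s0 + 1)).1 := by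
      simp only [stepB]
      split
      · positivity
      · exact hidx
    rw [show s0 + k + 1 = s0 + 1 + k by omega,
        ih (s0 + 1) (stepB xs k (idx, mx) (s0 + 1)).2 (stepB xs k (idx, mx) (s0 + 1)).1
          hidx' (by omega)]
    simp only [show s0 + 1 + m = s0 + (m + 1) by omega]


-- the prefix list the B port builds
def Plist (xs : List Int) : List Int :=
  xs.foldl (fun ps x => ps ++ [ps.getLastD 0 + x]) ([0] : List Int)

lemma Plist_getD (xs : List Int) (m : Nat) (hm : m ≤ xs.length) :
    (Plist xs).getD m 0 = Pf xs m := by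
  have h := fold_pfx xs [] 0
  simp only [List.nil_append] at h
  rw [Plist, h, pfx_getD xs m 0 hm, zero_add]

-- the two per-length bodies, named so the outer folds can be read as maps
def fA (xs : List Int) (i0 : Nat) : Int :=
  ((List.range xs.length).foldl (stepA xs (i0 + 1)) ((0 : Int), (0 : Int), (-1 : Int))).2.2

def fB (xs : List Int) (k0 : Nat) : Int :=
  ((List.range' 1 (xs.length - (k0 + 1))).foldl (fun (st : Int × Int) s =>
      let v := (Plist xs).getD (s + (k0 + 1)) 0 - (Plist xs).getD s 0
      if st.2 < v then ((s : Int), v) else st)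
    ((0 : Int), (Plist xs).getD (k0 + 1) 0 - (Plist xs).getD 0 0)).1

lemma inner_eq (xs : List Int) (k : Nat) (hk1 : 1 ≤ k) (hk2 : k ≤ xs.length) :
    ((List.range xs.length).foldl (stepA xs k) ((0 : Int), (0 : Int), (-1 : Int))).2.2 =
    ((List.range' 1 (xs.length - k)).foldl (stepB xs k) ((0 : Int), Pf xs k - Pf xs 0)).1 := by
  have hP0 : Pf xs 0 = 0 := by simp [Pf]
  have hsplit : List.range xs.length =
      List.range' 0 (k - 1) ++ ((k - 1) :: List.range' k (xs.length - k)) := by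
    rw [List.range_eq_range']
    rw [show xs.length = (k - 1) + ((xs.length - k) + 1) by omega]
    rw [← List.range'_append_1]
    congr 1
    rw [List.range'_succ]
    congr 2 <;> omega
  rw [hsplit, List.foldl_append, List.foldl_cons]
  have h1 : (List.range' 0 (k - 1)).foldl (stepA xs k) ((0 : Int), (0 : Int), (-1 : Int)) =
      (Pf xs (k - 1), 0, -1) := by
    have := phase1 xs k hk2 (k - 1) 0 (by omega)
    simpa [hP0] using this
  rw [h1]
  have hstep : stepA xs k (Pf xs (k - 1), 0, -1) (k - 1) = (Pf xs k, Pf xs k, 0) := by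
    have hnk : ¬ k ≤ k - 1 := by omega
    have hk' : k ≤ (k - 1) + 1 := by omega
    have hsum : Pf xs (k - 1) + xs.getD (k - 1) 0 = Pf xs k := by
      rw [← Pf_succ xs (k - 1) (by omega)]; congr 1; omega
    have hidx : ((k - 1 : Nat) : Int) - (k : Int) + 1 = 0 := by omega
    simp only [stepA, if_neg hnk]
    rw [if_pos ⟨hk', Or.inl trivial⟩, hsum, hidx]
  rw [hstep]
  have h2 := phase2 xs k hk1 (xs.length - k) 0 (Pf xs k) 0 le_rfl (by omega)
  simp only [Nat.zero_add, hP0, sub_zero] at h2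
  rw [h2]
  simp [hP0]

lemma body_eq (xs : List Int) (i0 : Nat) (hi : i0 < xs.length) : fA xs i0 = fB xs i0 := by
  have hk1 : 1 ≤ i0 + 1 := by omega
  have hk2 : i0 + 1 ≤ xs.length := by omega
  rw [fA, fB, inner_eq xs (i0 + 1) hk1 hk2]
  have hfold : (List.range' 1 (xs.length - (i0 + 1))).foldl (fun (st : Int × Int) s =>
      let v := (Plist xs).getD (s + (i0 + 1)) 0 - (Plist xs).getD s 0
      if st.2 < v then ((s : Int), v) else st)
      ((0 : Int), (Plist xs).getD (i0 + 1) 0 - (Plist xs).getD 0 0) =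
      (List.range' 1 (xs.length - (i0 + 1))).foldl (stepB xs (i0 + 1))
      ((0 : Int), (Plist xs).getD (i0 + 1) 0 - (Plist xs).getD 0 0) := by
    apply PySem.List.foldl_congr_mem
    intro acc s hs
    rw [List.mem_range'_1] at hs
    simp only [stepB]
    rw [Plist_getD xs (s + (i0 + 1)) (by omega), Plist_getD xs s (by omega)]
  rw [hfold, Plist_getD xs (i0 + 1) hk2, Plist_getD xs 0 (by omega)]

-- ===== VERDICT (by name: the statement is the Claim_ definition above) =====
theorem maxSumSegments_spec : Claim_equal_maxSumSegments := by
  intro xs _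
  show maxSumSegments xs = maxSumSegments_alt xs
  have h1 : maxSumSegments xs = (List.range xs.length).map (fA xs) := by
    show (List.range xs.length).foldl (fun r i0 => r ++ [fA xs i0]) [] = _
    rw [PySem.List.foldl_append_singleton_eq_map]; rfl
  have h2 : maxSumSegments_alt xs = (List.range xs.length).map (fB xs) := by
    show (List.range xs.length).foldl (fun r k0 => r ++ [fB xs k0]) [] = _
    rw [PySem.List.foldl_append_singleton_eq_map]; rfl
  rw [h1, h2]
  apply List.map_congr_left
  intro i0 hi
  exact body_eq xs i0 (List.mem_range.mp hi)
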